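-- pv_equiv track=rewrite | github.com/MrBrantCode/unitest_baseline | mut_generate/mist_train_cf/cf_67645/solution.py | find_repeating_substring
-- ===== SOURCE A (Python) =====
-- def find_repeating_substring(s, sub):
--     sub_len = len(sub)
--     if s.endswith(sub):
--         indices = [i for i in range(len(s)) if s.startswith(sub, i)]
--         if len(indices) < 2:
--             return False
--         diff = indices[1] - indices[0]
--         for i in range(1, len(indices)-1):
--             if indices[i+1] - indices[i] != diff:
--                 return False
--         return True
--     return False
-- ===== SOURCE B (Python) =====
-- def find_repeating_substring(s, sub):
--     # Column-wise sieve: keep a shrinking candidate list of start positions and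
--     # filter it one pattern character at a time; then compare the survivors with
--     # an explicitly constructed arithmetic progression ending at len(s)-len(sub).
--     n, m = len(s), len(sub)
--     cand = list(range(n - m + 1))
--     for t in range(m):
--         c = sub[t]
--         cand = [i for i in cand if s[i + t] == c]
--         if not cand:
--             return False
--     if len(cand) < 2 or cand[-1] != n - m:
--         return False
--     d = cand[1] - cand[0]
--     return cand == list(range(cand[0], cand[0] + d * len(cand), d))
-- ===== Notes on version B (the rewrite author's own statement) =====
-- stated objective: alternative
-- what changed: A scans every start position with startswith and then re-walks the index list checking pairwise gaps; B transposes the matching into a per-pattern-character sieve over a shrinking candidate list (no per-position substring scan), replaces the endswith test by a last-candidate == len(s)-len(sub) check, and replaces the gap loop by comparing the survivors to an explicitly constructed arithmetic progression.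
-- outside the precondition, e.g. on find_repeating_substring('a', ''): A returns False, B returns True
import Mathlib
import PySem

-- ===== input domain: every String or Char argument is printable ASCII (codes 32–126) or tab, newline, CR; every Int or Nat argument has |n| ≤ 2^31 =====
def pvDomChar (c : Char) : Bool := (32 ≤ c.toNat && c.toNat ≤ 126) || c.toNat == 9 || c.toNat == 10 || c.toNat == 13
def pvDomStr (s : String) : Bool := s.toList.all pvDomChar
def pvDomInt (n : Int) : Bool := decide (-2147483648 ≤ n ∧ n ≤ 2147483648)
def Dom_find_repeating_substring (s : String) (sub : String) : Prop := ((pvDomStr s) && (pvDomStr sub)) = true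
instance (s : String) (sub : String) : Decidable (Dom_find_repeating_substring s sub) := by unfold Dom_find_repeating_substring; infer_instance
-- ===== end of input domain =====

-- B replaces A's per-position startswith scan and pairwise-gap loop by a per-pattern-character
-- sieve over a shrinking candidate list, a last-candidate = len(s)-len(sub) check instead of
-- endswith, and a comparison with an explicitly built arithmetic progression (objective: alternative).

-- ===== PORT A =====
-- s.startswith(sub, i) for 0 ≤ i < len(s) is exactly: sub.toList is a prefix of s.toList.drop i (exact on that range).
-- indices are Nats (the list is strictly increasing, so the Nat differences equal Python's int differences).
-- A's loop 'for i in range(1, len(indices)-1)' ported as structural recursion over List.range' 1 (len-2).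
def pvAChk (indices : List Nat) (diff : Nat) : List Nat → Bool
  | [] => true
  | i :: rest => if indices[i+1]! - indices[i]! ≠ diff then false else pvAChk indices diff rest

def find_repeating_substring (s : String) (sub : String) : Bool :=
  let cs := s.toList
  let p := sub.toList
  if PySem.Chars.endswith cs p then
    let indices := (List.range cs.length).filter (fun i => p.isPrefixOf (cs.drop i))
    if indices.length < 2 then false
    else
      let diff := indices[1]! - indices[0]!
      pvAChk indices diff (List.range' 1 (indices.length - 2))
  else false

-- ===== PORT B =====
-- Source B's for-loop over range(m) with its early 'return False': recursion over the list of
-- pattern positions, 'none' = the early False return.  list(range(n - m + 1)) = List.range (n+1-m)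
-- for all Nats n, m (both are empty when m > n).  Candidates i satisfy i + t < n, so cs[i+t]! is
-- exactly Python's s[i+t].  cand is strictly increasing, so d = cand[1]-cand[0] ≥ 1 and Python's
-- list(range(a, a + d*k, d)) is exactly List.range' a k d (k elements a, a+d, …).
def pvBSieve (cs p : List Char) : List Nat → List Nat → Option (List Nat)
  | [], cand => some cand
  | t :: ts, cand =>
      let cand' := cand.filter (fun i => cs[i + t]! == p[t]!)
      if cand' = [] then none else pvBSieve cs p ts cand'

def find_repeating_substring_alt (s : String) (sub : String) : Bool :=
  let cs := s.toList
  let p := sub.toList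
  let n := cs.length
  let m := p.length
  match pvBSieve cs p (List.range m) (List.range (n + 1 - m)) with
  | none => false
  | some cand =>
      if cand.length < 2 ∨ cand.getLast! ≠ n - m then false
      else
        let d := cand[1]! - cand[0]!
        decide (cand = List.range' cand[0]! cand.length d)

-- ===== PRECONDITION & SPEC =====
-- Pre_ excludes one corner: sub = "" with len(s) = 1, where A's occurrence positions
-- range(len(s)) omit the end-of-string match so A returns False, while B's sieve counts the
-- end position too and returns True; both conventions for the empty pattern are defensible.
def Pre_find_repeating_substring (s : String) (sub : String) : Prop :=
  ¬ (sub = "" ∧ s.toList.length = 1)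
instance (s : String) (sub : String) : Decidable (Pre_find_repeating_substring s sub) := by unfold Pre_find_repeating_substring; infer_instance

def pvWitness_find_repeating_substring : String × String := ("abab", "ab")

def Spec_find_repeating_substring (s : String) (sub : String) (out : Bool) : Prop := out = find_repeating_substring_alt s sub
instance (s : String) (sub : String) (out : Bool) : Decidable (Spec_find_repeating_substring s sub out) := by unfold Spec_find_repeating_substring; infer_instance

-- ===== CLAIM (what is proved, stated in full; the proofs are below) =====
def Claim_equal_find_repeating_substring : Prop := ∀ (s : String) (sub : String), Dom_find_repeating_substring s sub → Pre_find_repeating_substring s sub → Spec_find_repeating_substring s sub (find_repeating_substring s sub)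

-- ===== LEMMAS AND PROOFS =====

-- the sieve, run on a contiguous block of pattern positions, is a single filter (none iff it empties)
theorem pvBSieve_run (cs p : List Char) (k t : Nat) (cand : List Nat) :
    pvBSieve cs p (List.range' t k) cand =
      (if (cand.filter (fun i => (List.range' t k).all (fun u => cs[i+u]! == p[u]!))) = [] ∧ k ≠ 0
       then none
       else some (cand.filter (fun i => (List.range' t k).all (fun u => cs[i+u]! == p[u]!)))) := by
  induction k generalizing t cand with
  | zero => simp [pvBSieve, List.filter_true]
  | succ k ih =>
      rw [List.range'_succ, pvBSieve]
      have hff : cand.filter (fun i => (t :: List.range' (t+1) k).all (fun u => cs[i+u]! == p[u]!))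
          = (cand.filter (fun i => cs[i+t]! == p[t]!)).filter
              (fun i => (List.range' (t+1) k).all (fun u => cs[i+u]! == p[u]!)) := by
        rw [List.filter_filter]
        apply List.filter_congr
        intro i _
        simp [List.all_cons, Bool.and_comm]
      rw [hff]
      set cand' := cand.filter (fun i => cs[i+t]! == p[t]!) with hc
      by_cases h0 : cand' = []
      · simp [h0, List.filter_nil]
      · rw [if_neg h0, ih (t+1) cand']
        by_cases hq : cand'.filter (fun i => (List.range' (t+1) k).all (fun u => cs[i+u]! == p[u]!)) = []
        · have hk : k ≠ 0 := by
            intro hk0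
            subst hk0
            simp only [List.range'_zero, List.all_nil, List.filter_true] at hq
            exact h0 hq
          rw [if_pos ⟨hq, hk⟩, if_pos ⟨hq, Nat.succ_ne_zero k⟩]
        · rw [if_neg (fun h => hq h.1), if_neg (fun h => hq h.1)]

-- the per-character test over range m is exactly prefix-of-drop, for in-range start positions
theorem pvAll_eq_isPrefixOf (cs p : List Char) (i : Nat) (h : i + p.length ≤ cs.length) :
    ((List.range p.length).all (fun u => cs[i+u]! == p[u]!)) = p.isPrefixOf (cs.drop i) := by
  rw [Bool.eq_iff_iff, List.all_eq_true, List.isPrefixOf_iff_prefix]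
  constructor
  · intro hall
    rw [List.prefix_iff_eq_take]
    apply List.ext_getElem
    · simp; omega
    · intro u hu1 hu2
      have hu : u < p.length := hu1
      have h1 := hall u (List.mem_range.mpr hu)
      rw [beq_iff_eq] at h1
      rw [List.getElem_take, List.getElem_drop]
      rw [getElem!_pos cs (i+u) (by omega), getElem!_pos p u hu] at h1
      exact h1.symm
  · intro hpre u hu
    rw [List.mem_range] at hu
    rw [beq_iff_eq, getElem!_pos cs (i+u) (by omega), getElem!_pos p u hu]
    rw [hpre.getElem hu, List.getElem_drop]

-- B's survivor list = A's indices list (pattern nonempty)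
theorem pvOcc_eq_indices (cs p : List Char) (hm : p ≠ []) :
    (List.range (cs.length + 1 - p.length)).filter
        (fun i => (List.range p.length).all (fun u => cs[i+u]! == p[u]!))
      = (List.range cs.length).filter (fun i => p.isPrefixOf (cs.drop i)) := by
  have hm1 : 1 ≤ p.length := List.length_pos_iff.mpr hm
  have hstep : ∀ i ∈ List.range (cs.length + 1 - p.length),
      ((List.range p.length).all (fun u => cs[i+u]! == p[u]!)) = p.isPrefixOf (cs.drop i) := by
    intro i hi
    rw [List.mem_range] at hi
    exact pvAll_eq_isPrefixOf cs p i (by omega)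
  rw [List.filter_congr hstep]
  by_cases hle : p.length ≤ cs.length
  · have hsplit : List.range cs.length
        = List.range (cs.length + 1 - p.length)
          ++ (List.range (p.length - 1)).map (fun x => (cs.length + 1 - p.length) + x) := by
      rw [← List.range_add]
      congr 1
      omega
    rw [hsplit, List.filter_append]
    have h2 : ((List.range (p.length - 1)).map (fun x => (cs.length + 1 - p.length) + x)).filter
        (fun i => p.isPrefixOf (cs.drop i)) = [] := by
      rw [List.filter_eq_nil_iff]
      intro a ha
      simp only [List.mem_map, List.mem_range] at ha
      obtain ⟨x, hx, rfl⟩ := ha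
      intro hp
      have hlen := (List.isPrefixOf_iff_prefix.mp hp).length_le
      rw [List.length_drop] at hlen
      omega
    rw [h2, List.append_nil]
  · have h0 : cs.length + 1 - p.length = 0 := by omega
    rw [h0]
    symm
    rw [List.range_zero, List.filter_nil, List.filter_eq_nil_iff]
    intro a ha hp
    rw [List.mem_range] at ha
    have hlen := (List.isPrefixOf_iff_prefix.mp hp).length_le
    rw [List.length_drop] at hlen
    omega

-- in a strictly increasing list, an upper-bound member is the last element
theorem pvGetLast_of_max {l : List Nat} (hp : l.Pairwise (· < ·)) {x : Nat}
    (hx : x ∈ l) (hub : ∀ y ∈ l, y ≤ x) : l.getLast! = x := by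
  induction l with
  | nil => cases hx
  | cons a l ih =>
      cases l with
      | nil =>
          have : x = a := by simpa using hx
          simp [List.getLast!, this]
      | cons b l' =>
          have hstep : (a :: b :: l').getLast! = (b :: l').getLast! := by simp [List.getLast!]
          rw [hstep]
          rcases List.mem_cons.mp hx with rfl | hx'
          · have hab : x < b := (List.pairwise_cons.mp hp).1 b (by simp)
            have hba : b ≤ x := hub b (by simp)
            omega
          · exact ih (List.pairwise_cons.mp hp).2 hx'
              (fun y hy => hub y (List.mem_cons_of_mem a hy))

-- endswith ⟺ n-m is an occurrence (pattern nonempty)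
theorem pvEndswith_iff_mem (cs p : List Char) (hm : p ≠ []) :
    PySem.Chars.endswith cs p = true ↔
      (cs.length - p.length) ∈ (List.range cs.length).filter (fun i => p.isPrefixOf (cs.drop i)) := by
  have hm1 : 1 ≤ p.length := List.length_pos_iff.mpr hm
  rw [PySem.Chars.endswith_iff, List.mem_filter, List.mem_range]
  constructor
  · intro hsuf
    have hle : p.length ≤ cs.length := hsuf.length_le
    refine ⟨by omega, ?_⟩
    rw [List.isPrefixOf_iff_prefix, ← List.suffix_iff_eq_drop.mp hsuf]
  · rintro ⟨h1, h2⟩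
    have hpre := List.isPrefixOf_iff_prefix.mp h2
    have hlen := hpre.length_le
    rw [List.length_drop] at hlen
    have hle : p.length ≤ cs.length := by omega
    rw [List.suffix_iff_eq_drop]
    exact hpre.eq_of_length (by rw [List.length_drop]; omega)

-- Boolean "all consecutive gaps from pv along rest equal d"
def pvChainB (d : Nat) : Nat → List Nat → Bool
  | _, [] => true
  | pv, j :: rest => (j - pv == d) && pvChainB d j rest

theorem pvAChk_eq_chain (d : Nat) (pre : List Nat) (pv : Nat) (rest : List Nat) :
    pvAChk (pre ++ pv :: rest) d (List.range' pre.length rest.length) = pvChainB d pv rest := by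
  induction rest generalizing pre pv with
  | nil => simp [pvAChk, pvChainB]
  | cons j rest ih =>
      simp only [List.length_cons]
      rw [List.range'_succ, pvAChk, pvChainB]
      have h0 : (pre ++ pv :: j :: rest)[pre.length]! = pv := by simp
      have h1 : (pre ++ pv :: j :: rest)[pre.length + 1]! = j := by simp
      rw [h0, h1]
      by_cases hne : j - pv = d
      · have h2 := ih (pre ++ [pv]) j
        simp only [List.append_assoc, List.cons_append, List.nil_append,
          List.length_append, List.length_cons, List.length_nil] at h2
        simp [hne, h2]
      · simp [hne]

-- the gap chain ⟺ equality with the arithmetic progression, on increasing lists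
theorem pvChain_eq_range' (rest : List Nat) (pv d : Nat)
    (hp : (pv :: rest).Pairwise (· < ·)) :
    pvChainB d pv rest = decide (rest = List.range' (pv + d) rest.length d) := by
  induction rest generalizing pv with
  | nil => simp [pvChainB]
  | cons j rest ih =>
      have hj : pv < j := (List.pairwise_cons.mp hp).1 j (by simp)
      rw [pvChainB, List.length_cons, List.range'_succ]
      by_cases hd : j - pv = d
      · have hjd : j = pv + d := by omega
        subst hjd
        have htail := ih (pv + d) (List.pairwise_cons.mp hp).2
        simp [htail]
      · have hne : j ≠ pv + d := by omega
        simp [hd, hne]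

-- ===== VERDICT (by name: the statement is the Claim_ definition above) =====
theorem find_repeating_substring_spec : Claim_equal_find_repeating_substring := by
  intro s sub _ hpre
  unfold Spec_find_repeating_substring
  simp only [find_repeating_substring, find_repeating_substring_alt]
  by_cases hm0 : sub = ""
  · -- the empty pattern (with len(s) ≠ 1): A and B both reduce to closed checks on len(s)
    subst hm0
    have hn1 : s.toList.length ≠ 1 := fun h => hpre ⟨rfl, h⟩
    have hptl : ("" : String).toList = [] := rfl
    rw [hptl]
    have he : PySem.Chars.endswith s.toList [] = true :=
      (PySem.Chars.endswith_iff _ _).mpr (List.nil_suffix)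
    rw [if_pos he]
    have hind : (List.range s.toList.length).filter
        (fun i => ([] : List Char).isPrefixOf (s.toList.drop i)) = List.range s.toList.length := by
      simp [List.isPrefixOf]
    rw [hind]
    have hsieve : pvBSieve s.toList [] (List.range ([] : List Char).length)
        (List.range (s.toList.length + 1 - ([] : List Char).length))
        = some (List.range (s.toList.length + 1)) := by
      simp [pvBSieve]
    rw [hsieve]
    simp only [List.length_nil, Nat.sub_zero]
    generalize hn : s.toList.length = n at hn1 ⊢
    match n, hn1 with
    | 0, _ => decide
    | (k+2), _ =>
      have hlenA : ¬ ((List.range (k+2)).length < 2) := by simp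
      have hlenB : ¬ ((List.range (k+2+1)).length < 2 ∨
          (List.range (k+2+1)).getLast! ≠ k+2) := by
        rintro (h | h)
        · simp at h
        · exact h (pvGetLast_of_max List.pairwise_lt_range (by simp)
            (fun y hy => by rw [List.mem_range] at hy; omega))
      rw [if_neg hlenA, if_neg hlenB]
      have eA0 : (List.range (k+2))[0]! = 0 := by
        rw [getElem!_pos _ _ (by simp)]; simp
      have eA1 : (List.range (k+2))[1]! = 1 := by
        rw [getElem!_pos _ _ (by simp)]; simp
      have eB0 : (List.range (k+2+1))[0]! = 0 := by
        rw [getElem!_pos _ _ (by simp)]; simp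
      have eB1 : (List.range (k+2+1))[1]! = 1 := by
        rw [getElem!_pos _ _ (by simp)]; simp
      rw [eA0, eA1, eB0, eB1]
      have hsplit : List.range (k+2) = [0] ++ 1 :: List.range' 2 k := by
        rw [List.range_eq_range', List.range'_succ, List.range'_succ]
        rfl
      have hA : pvAChk (List.range (k+2)) (1 - 0)
          (List.range' 1 ((List.range (k+2)).length - 2)) = true := by
        rw [hsplit]
        have h2 := pvAChk_eq_chain 1 [0] 1 (List.range' 2 k)
        simp only [List.length_range', List.length_cons, List.length_append,
          List.length_nil] at h2 ⊢
        have hk2 : 0 + 1 + (k + 1) - 2 = k ∧ 0 + 1 = 1 := by omega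
        rw [hk2.1]
        rw [show (1 : Nat) = 0 + 1 from rfl, h2, pvChain_eq_range' (List.range' 2 k) 1 1 (by
          have := List.pairwise_lt_range' (s := 1) (n := k+1) 1
          rwa [List.range'_succ] at this)]
        simp [List.length_range']
      rw [hA]
      have hB : decide ((List.range (k+2+1) : List Nat)
          = List.range' 0 (List.range (k+2+1)).length (1 - 0)) = true := by
        simp [List.range_eq_range']
      rw [hB]
  have hsub : sub ≠ "" := hm0
  have hm : sub.toList ≠ [] := fun h => hsub (String.toList_eq_nil_iff.mp h)
  have hm1 : 1 ≤ sub.toList.length := List.length_pos_iff.mpr hm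
  have hrun := pvBSieve_run s.toList sub.toList sub.toList.length 0
    (List.range (s.toList.length + 1 - sub.toList.length))
  rw [← List.range_eq_range'] at hrun
  rw [pvOcc_eq_indices s.toList sub.toList hm] at hrun
  have hpl : ((List.range s.toList.length).filter
      (fun i => sub.toList.isPrefixOf (s.toList.drop i))).Pairwise (· < ·) :=
    List.Pairwise.sublist (List.filter_sublist) List.pairwise_lt_range
  have hub : ∀ y ∈ (List.range s.toList.length).filter
      (fun i => sub.toList.isPrefixOf (s.toList.drop i)), y ≤ s.toList.length - sub.toList.length := by
    intro y hy
    rw [List.mem_filter, List.mem_range] at hy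
    have hlen := (List.isPrefixOf_iff_prefix.mp hy.2).length_le
    rw [List.length_drop] at hlen
    omega
  have hend := pvEndswith_iff_mem s.toList sub.toList hm
  generalize hl : (List.range s.toList.length).filter
      (fun i => sub.toList.isPrefixOf (s.toList.drop i)) = l at hrun hpl hub hend ⊢
  rw [hrun]
  by_cases hnil : l = []
  · have hcond : l = [] ∧ sub.toList.length ≠ 0 :=
      ⟨hnil, fun h => hm (List.length_eq_zero_iff.mp h)⟩
    rw [if_pos hcond, hnil]
    by_cases he : PySem.Chars.endswith s.toList sub.toList = true
    · simp [he]
    · simp [he]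
  · have hcond : ¬ (l = [] ∧ sub.toList.length ≠ 0) := fun h => hnil h.1
    rw [if_neg hcond]
    rcases l with _ | ⟨a, l1⟩
    · exact absurd rfl hnil
    rcases l1 with _ | ⟨b, rest⟩
    · by_cases he : PySem.Chars.endswith s.toList sub.toList = true
      · simp [he]
      · simp [he]
    · show (if PySem.Chars.endswith s.toList sub.toList then _ else false)
        = (if (a :: b :: rest : List Nat).length < 2 ∨
              (a :: b :: rest : List Nat).getLast! ≠ s.toList.length - sub.toList.length
           then false
           else decide ((a :: b :: rest : List Nat) =
             List.range' (a :: b :: rest : List Nat)[0]! (a :: b :: rest : List Nat).length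
               ((a :: b :: rest : List Nat)[1]! - (a :: b :: rest : List Nat)[0]!)))
      have hab : a < b := (List.pairwise_cons.mp hpl).1 b (by simp)
      have hlen2 : ¬ ((a :: b :: rest : List Nat).length < 2) := by simp
      by_cases hlast : (a :: b :: rest : List Nat).getLast! = s.toList.length - sub.toList.length
      · have hglm : (a :: b :: rest : List Nat).getLast! ∈ (a :: b :: rest : List Nat) := by
          have h1 : (a :: b :: rest : List Nat) ≠ [] := by simp
          rw [List.getLast!_eq_getLast?_getD, List.getLast?_eq_some_getLast h1]
          exact List.getLast_mem h1
        have he : PySem.Chars.endswith s.toList sub.toList = true :=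
          hend.mpr (hlast ▸ hglm)
        have hcond2 : ¬ ((a :: b :: rest : List Nat).length < 2 ∨
            (a :: b :: rest : List Nat).getLast! ≠ s.toList.length - sub.toList.length) :=
          fun h => h.elim hlen2 (fun h2 => h2 hlast)
        rw [if_pos he, if_neg hlen2, if_neg hcond2]
        have h0 : (a :: b :: rest : List Nat)[0]! = a := by simp
        have h1 : (a :: b :: rest : List Nat)[1]! = b := by simp
        rw [h0, h1]
        have hA : pvAChk (a :: b :: rest) (b - a)
            (List.range' 1 ((a :: b :: rest : List Nat).length - 2)) = pvChainB (b - a) b rest := by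
          have h2 := pvAChk_eq_chain (b - a) [a] b rest
          simpa using h2
        rw [hA, pvChain_eq_range' rest b (b - a) (List.pairwise_cons.mp hpl).2]
        congr 1
        rw [eq_iff_iff]
        have hadb : a + (b - a) = b := by omega
        rw [List.length_cons, List.length_cons, List.range'_succ, List.range'_succ, hadb]
        simp
      · have he : PySem.Chars.endswith s.toList sub.toList ≠ true := fun he =>
          hlast (pvGetLast_of_max hpl (hend.mp he) hub)
        rw [if_neg he, if_pos (Or.inr hlast)]
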